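-- pv_equiv track=rewrite | github.com/liulouzhu/ai-health-fitness-agent | agent/planner.py | _deduplicate_tasks
-- ===== SOURCE A (Python) =====
-- def _deduplicate_tasks(tasks: list) -> list:
--     """同一 branch 多个子任务合并文本（保留顺序）。"""
--     branch_to_idx = {}
--     deduplicated = []
--     for task in tasks:
--         branch = task["branch"]
--         if branch in branch_to_idx:
--             idx = branch_to_idx[branch]
--             deduplicated[idx]["query"] += "，" + task["query"]
--         else:
--             branch_to_idx[branch] = len(deduplicated)
--             deduplicated.append(task)
--     return deduplicated
-- ===== SOURCE B (Python) =====
-- def _deduplicate_tasks(tasks: list) -> list: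
--     # Stage 1: group the task objects themselves by branch (insertion order kept).
--     groups = {}
--     for task in tasks:
--         groups.setdefault(task["branch"], []).append(task)
--     # Stage 2: emit each group's first task; a multi-task group gets its whole
--     # query list joined in one shot instead of incremental concatenation.
--     result = []
--     for group in groups.values():
--         head = group[0]
--         if len(group) > 1:
--             head["query"] = "，".join(t["query"] for t in group)
--         result.append(head)
--     return result
-- ===== Notes on version B (the rewrite author's own statement) =====
-- stated objective: alternative
-- what changed: Replaces A's single incremental pass (branch->index dict plus a result list patched through integer indices with repeated query +=) by two staged passes: first group the whole task objects per branch with setdefault, then emit each group's head task, rewriting its query once with a single '，'.join over the group's queries.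
import Mathlib
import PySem

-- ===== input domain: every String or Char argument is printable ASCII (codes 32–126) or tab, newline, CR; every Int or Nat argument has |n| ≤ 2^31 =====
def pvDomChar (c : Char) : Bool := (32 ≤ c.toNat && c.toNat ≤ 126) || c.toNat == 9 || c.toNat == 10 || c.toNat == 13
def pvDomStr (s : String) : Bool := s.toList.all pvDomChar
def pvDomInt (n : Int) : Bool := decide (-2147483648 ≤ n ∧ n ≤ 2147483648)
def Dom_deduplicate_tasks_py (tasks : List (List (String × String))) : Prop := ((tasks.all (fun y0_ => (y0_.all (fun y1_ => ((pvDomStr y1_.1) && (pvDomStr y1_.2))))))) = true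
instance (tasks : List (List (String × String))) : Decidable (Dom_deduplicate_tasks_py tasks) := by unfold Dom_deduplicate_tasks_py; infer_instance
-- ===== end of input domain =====

-- B restructures A's single incremental pass (branch->index dict + index-patched list with
-- repeated query +=) into two staged passes: group whole tasks per branch, then emit each
-- group's head with its query rewritten once by a single '，'-join (alternative; same cost).
-- Both Pythons mutate the stored task dicts in place identically; the equivalence proved
-- here is about the return value.


-- shared helpers: a task is the association-list image of a Python dict (lookup = first match)
-- task["branch"] / task["query"]; the .getD "" default is only reached where Python raises KeyError (outside Pre_)
def pvBKey (t : List (String × String)) : String := ((PySem.Dict.mk t).get? "branch").getD ""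
def pvQVal (t : List (String × String)) : String := ((PySem.Dict.mk t).get? "query").getD ""
-- t["query"] += s  (in-place; value position kept)
def pvUpd (t : List (String × String)) (s : String) : List (String × String) :=
  ((PySem.Dict.mk t).modify "query" "" (· ++ s)).items

-- ===== PORT A =====
def pvAStep (st : PySem.Dict String Int × List (List (String × String)))
    (task : List (String × String)) : PySem.Dict String Int × List (List (String × String)) :=
  let branch := pvBKey task
  if st.1.contains branch then
    let idx := st.1.getD branch 0
    let t0 := (PySem.List.pyGet? st.2 idx).getD []
    (st.1, st.2.set idx.toNat (pvUpd t0 ("，" ++ pvQVal task)))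
  else
    (st.1.insert branch (st.2.length : Int), st.2 ++ [task])

def deduplicate_tasks_py (tasks : List (List (String × String))) : List (List (String × String)) :=
  (tasks.foldl pvAStep (PySem.Dict.empty, [])).2

-- ===== PORT B =====
-- stage 1: groups.setdefault(task["branch"], []).append(task)
def pvGStep (g : PySem.Dict String (List (List (String × String))))
    (task : List (String × String)) : PySem.Dict String (List (List (String × String))) :=
  g.insert (pvBKey task) (g.getD (pvBKey task) [] ++ [task])

-- stage 2 body: head = group[0]; if len(group) > 1: head["query"] = "，".join(queries)
-- (the join reads t["query"]; its .getD "" default is only reached where Python B raises KeyError, outside Pre_)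
def pvFinish (group : List (List (String × String))) : List (String × String) :=
  let head := group.headD []
  if 1 < group.length then
    ((PySem.Dict.mk head).insert "query" (PySem.Str.join "，" (group.map pvQVal))).items
  else head

def deduplicate_tasks_py_alt (tasks : List (List (String × String))) : List (List (String × String)) :=
  ((tasks.foldl pvGStep PySem.Dict.empty).values).map pvFinish

-- ===== PRECONDITION & SPEC =====
-- Pre_ excludes (a) inputs where the Pythons raise KeyError — a task without "branch", or a task
-- whose branch occurs more than once (so it takes part in a merge) without "query" — and (b) tasks
-- whose association list has duplicate keys, which do not represent a Python dict at all.
def Pre_deduplicate_tasks_py (tasks : List (List (String × String))) : Prop :=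
  (∀ t ∈ tasks, "branch" ∈ t.map Prod.fst ∧ (t.map Prod.fst).Nodup) ∧
  (∀ t ∈ tasks, 1 < tasks.countP (fun u => pvBKey u == pvBKey t) → "query" ∈ t.map Prod.fst)
instance (tasks : List (List (String × String))) : Decidable (Pre_deduplicate_tasks_py tasks) := by
  unfold Pre_deduplicate_tasks_py; infer_instance

def pvWitness_deduplicate_tasks_py : List (List (String × String)) :=
  [[("branch", "a"), ("query", "x")], [("branch", "b")], [("branch", "a"), ("query", "y")]]

def Spec_deduplicate_tasks_py (tasks : List (List (String × String))) (out : List (List (String × String))) : Prop := out = deduplicate_tasks_py_alt tasks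
instance (tasks : List (List (String × String))) (out : List (List (String × String))) : Decidable (Spec_deduplicate_tasks_py tasks out) := by unfold Spec_deduplicate_tasks_py; infer_instance

-- ===== CLAIM (what is proved, stated in full; the proofs are below) =====
def Claim_equal_deduplicate_tasks_py : Prop := ∀ (tasks : List (List (String × String))), Dom_deduplicate_tasks_py tasks → Pre_deduplicate_tasks_py tasks → Spec_deduplicate_tasks_py tasks (deduplicate_tasks_py tasks)

-- ===== LEMMAS AND PROOFS =====

-- A's merged entry for a group: its first task with every later query folded in by +=
def pvMergeA (ts : List (List (String × String))) : List (String × String) :=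
  ts.tail.foldl (fun acc t => pvUpd acc ("，" ++ pvQVal t)) (ts.headD [])
def pvFm (p : String × List (List (String × String))) : String × List (String × String) :=
  (p.1, pvMergeA p.2)

-- ---- step 1: A equals a fold that keeps one merged dict branch -> merged task ----
def pvMStep (d : PySem.Dict String (List (String × String)))
    (task : List (String × String)) : PySem.Dict String (List (String × String)) :=
  let branch := pvBKey task
  match d.get? branch with
  | some t0 => d.insert branch (pvUpd t0 ("，" ++ pvQVal task))
  | none => d.insert branch task

def pvPair (t : List (String × String)) : String × List (String × String) := (pvBKey t, t)
def pvMkD (ded : List (List (String × String))) : PySem.Dict String (List (String × String)) :=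
  PySem.Dict.mk (ded.map pvPair)
def pvMkIdx' (ks : List String) (n : Nat) : PySem.Dict String Int :=
  PySem.Dict.mk ((ks.zipIdx n).map (fun p => (p.1, (p.2 : Int))))
def pvMkIdx (ded : List (List (String × String))) : PySem.Dict String Int :=
  pvMkIdx' (ded.map pvBKey) 0

lemma pvBKey_upd (t : List (String × String)) (s : String) : pvBKey (pvUpd t s) = pvBKey t := by
  show ((PySem.Dict.mk ((PySem.Dict.mk t).modify "query" "" (· ++ s)).items).get? "branch").getD ""
      = ((PySem.Dict.mk t).get? "branch").getD ""
  rw [show (PySem.Dict.mk ((PySem.Dict.mk t).modify "query" "" (· ++ s)).items)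
        = (PySem.Dict.mk t).modify "query" "" (· ++ s) from rfl]
  rw [PySem.Dict.modify, PySem.Dict.get?_insert_of_ne _ _ (by decide)]

lemma pvMkIdx'_keys (ks : List String) (n : Nat) : (pvMkIdx' ks n).keys = ks := by
  induction ks generalizing n with
  | nil => rfl
  | cons a l ih => simp [pvMkIdx', PySem.Dict.keys_mk, List.zipIdx_cons] at *
                   simpa using ih (n + 1)

lemma pvMkD_keys (ded : List (List (String × String))) : (pvMkD ded).keys = ded.map pvBKey := by
  simp [pvMkD, PySem.Dict.keys_mk, pvPair]

lemma pv_idxOf_cons_ne {α : Type} [BEq α] [LawfulBEq α] (b a : α) (l : List α) (h : ¬ a = b) :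
    List.idxOf b (a :: l) = List.idxOf b l + 1 := by
  simp [h]

lemma pv_map_id {α : Type} (l : List α) (f : α → α) (h : ∀ x ∈ l, f x = x) : l.map f = l := by
  induction l with
  | nil => rfl
  | cons a l ih => simp [h a (by simp), ih (fun x hx => h x (by simp [hx]))]

lemma pvMkIdx'_getD (ks : List String) (n : Nat) (b : String) (hb : b ∈ ks) :
    (pvMkIdx' ks n).getD b 0 = ((n + ks.idxOf b : Nat) : Int) := by
  induction ks generalizing n with
  | nil => simp at hb
  | cons a l ih =>
    by_cases h : a = b
    · subst h
      simp [pvMkIdx', List.zipIdx_cons, PySem.Dict.getD, PySem.Dict.get?_mk_cons]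
    · have hb' : b ∈ l := by
        rcases List.mem_cons.1 hb with h' | h'
        · exact absurd h'.symm h
        · exact h'
      have hx := ih (n + 1) hb'
      rw [pv_idxOf_cons_ne b _ _ h]
      simp only [pvMkIdx', List.zipIdx_cons, List.map_cons, PySem.Dict.getD,
        PySem.Dict.get?_mk_cons] at hx ⊢
      simp only [beq_iff_eq, h, if_false]
      rw [hx]
      push_cast
      ring

lemma pvMkD_get? (ded : List (List (String × String))) (b : String) (hb : b ∈ ded.map pvBKey) :
    (pvMkD ded).get? b = some (ded.getD ((ded.map pvBKey).idxOf b) []) := by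
  induction ded with
  | nil => simp at hb
  | cons t l ih =>
    by_cases h : pvBKey t = b
    · subst h
      simp [pvMkD, pvPair, PySem.Dict.get?_mk_cons]
    · have hb' : b ∈ l.map pvBKey := by
        rw [List.map_cons] at hb
        rcases List.mem_cons.1 hb with h' | h'
        · exact absurd h'.symm h
        · exact h'
      have hx := ih hb'
      simp only [List.map_cons, pvMkD, pvPair, PySem.Dict.get?_mk_cons] at hx ⊢
      rw [pv_idxOf_cons_ne b _ _ h]
      simpa [h] using hx

lemma pv_map_replace (ded : List (List (String × String))) (b : String) (v : List (String × String))
    (hnd : (ded.map pvBKey).Nodup) (hb : b ∈ ded.map pvBKey) (hv : pvBKey v = b) :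
    (ded.map pvPair).map (fun p => if (p.1 == b) = true then (b, v) else p)
      = (ded.set ((ded.map pvBKey).idxOf b) v).map pvPair := by
  induction ded with
  | nil => simp at hb
  | cons t l ih =>
    simp only [List.map_cons, List.nodup_cons] at hnd ⊢
    by_cases h : pvBKey t = b
    · subst h
      simp only [List.idxOf_cons_self, List.set_cons_zero, List.map_cons]
      have htail : (l.map pvPair).map
          (fun p => if (p.1 == pvBKey t) = true then (pvBKey t, v) else p) = l.map pvPair := by
        apply pv_map_id
        intro p hp
        rcases List.mem_map.1 hp with ⟨x, hx, rfl⟩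
        have hne : pvBKey x ≠ pvBKey t := fun he => hnd.1 (he ▸ List.mem_map_of_mem hx)
        simp [pvPair, hne]
      rw [htail]
      simp [pvPair, hv]
    · have hb' : b ∈ l.map pvBKey := by
        rw [List.map_cons] at hb
        rcases List.mem_cons.1 hb with h' | h'
        · exact absurd h'.symm h
        · exact h'
      rw [pv_idxOf_cons_ne b _ _ h]
      simp only [List.set_cons_succ, List.map_cons]
      rw [ih hnd.2 hb']
      simp [pvPair, h]

lemma pv_fold (tasks : List (List (String × String))) (ded : List (List (String × String)))
    (hnd : (ded.map pvBKey).Nodup) :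
    (tasks.foldl pvAStep (pvMkIdx ded, ded)).2 = (tasks.foldl pvMStep (pvMkD ded)).values := by
  induction tasks generalizing ded with
  | nil =>
    simp only [List.foldl_nil]
    rw [pvMkD, PySem.Dict.values_mk, List.map_map]
    exact (pv_map_id ded _ (fun x _ => rfl)).symm
  | cons task rest ih =>
    by_cases hb : pvBKey task ∈ ded.map pvBKey
    · -- merge case: the branch is already present
      have hi' : (ded.map pvBKey).idxOf (pvBKey task) < (ded.map pvBKey).length :=
        List.idxOf_lt_length_of_mem hb
      have hi : (ded.map pvBKey).idxOf (pvBKey task) < ded.length := by simpa using hi'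
      have hbi : (ded.map pvBKey)[(ded.map pvBKey).idxOf (pvBKey task)]'hi' = pvBKey task :=
        List.getElem_idxOf hi'
      have hkey : pvBKey (ded.getD ((ded.map pvBKey).idxOf (pvBKey task)) []) = pvBKey task := by
        rw [List.getD_eq_getElem ded [] hi]
        rw [List.getElem_map] at hbi
        exact hbi
      have hcA : (pvMkIdx ded).contains (pvBKey task) = true := by
        rw [PySem.Dict.contains_eq_decide_mem_keys, pvMkIdx, pvMkIdx'_keys]; simpa using hb
      have hgB := pvMkD_get? ded (pvBKey task) hb
      have hIdxGet : (pvMkIdx ded).getD (pvBKey task) 0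
          = (((ded.map pvBKey).idxOf (pvBKey task) : Nat) : Int) := by
        have := pvMkIdx'_getD (ded.map pvBKey) 0 (pvBKey task) hb
        simpa [pvMkIdx] using this
      have hvb : pvBKey (pvUpd (ded.getD ((ded.map pvBKey).idxOf (pvBKey task)) [])
          ("，" ++ pvQVal task)) = pvBKey task := by rw [pvBKey_upd]; exact hkey
      set v := pvUpd (ded.getD ((ded.map pvBKey).idxOf (pvBKey task)) []) ("，" ++ pvQVal task)
        with hvdef
      set ded' := ded.set ((ded.map pvBKey).idxOf (pvBKey task)) v with hd'def
      have hmap' : ded'.map pvBKey = ded.map pvBKey := by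
        rw [hd'def, List.map_set, hvb]
        calc ((ded.map pvBKey).set ((ded.map pvBKey).idxOf (pvBKey task)) (pvBKey task))
            = ((ded.map pvBKey).set ((ded.map pvBKey).idxOf (pvBKey task))
                ((ded.map pvBKey)[(ded.map pvBKey).idxOf (pvBKey task)]'hi')) := by rw [hbi]
          _ = ded.map pvBKey := List.set_getElem_self hi'
      have hstepA : pvAStep (pvMkIdx ded, ded) task = (pvMkIdx ded', ded') := by
        have hmk : pvMkIdx ded' = pvMkIdx ded := by rw [pvMkIdx, hmap']; rfl
        simp only [pvAStep, hcA, if_pos, hIdxGet, hmk]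
        rw [PySem.List.pyGet?_natCast]
        simp only [Int.toNat_natCast]
        rw [← List.getD_eq_getElem?_getD, ← hvdef, ← hd'def]
      have hstepB : pvMStep (pvMkD ded) task = pvMkD ded' := by
        simp only [pvMStep, hgB, ← hvdef]
        apply PySem.Dict.ext
        rw [PySem.Dict.items_insert_of_contains _ _
          (by rw [PySem.Dict.contains_eq_decide_mem_keys, pvMkD_keys]; simpa using hb)]
        show (ded.map pvPair).map _ = ded'.map pvPair
        rw [hd'def]
        exact pv_map_replace ded (pvBKey task) v hnd hb hvb
      rw [List.foldl_cons, List.foldl_cons, hstepA, hstepB]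
      exact ih ded' (by rw [hmap']; exact hnd)
    · -- fresh branch: appended to both structures
      have hcA : (pvMkIdx ded).contains (pvBKey task) = false := by
        rw [PySem.Dict.contains_eq_decide_mem_keys, pvMkIdx, pvMkIdx'_keys]; simpa using hb
      have hgB : (pvMkD ded).get? (pvBKey task) = none := by
        rw [PySem.Dict.get?_eq_none_iff_not_mem_keys, pvMkD_keys]; exact hb
      set ded' := ded ++ [task] with hd'def
      have hstepA : pvAStep (pvMkIdx ded, ded) task
          = (pvMkIdx ded', ded') := by
        have hmk : pvMkIdx ded' = (pvMkIdx ded).insert (pvBKey task) ((ded.length : Nat) : Int) := by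
          apply PySem.Dict.ext
          rw [PySem.Dict.items_insert_of_not_contains _ _ hcA]
          simp [pvMkIdx, pvMkIdx', hd'def, List.zipIdx_append, List.zipIdx]
        rw [hmk]
        simp [pvAStep, hcA, hd'def]
      have hstepB : pvMStep (pvMkD ded) task = pvMkD ded' := by
        simp only [pvMStep, hgB]
        apply PySem.Dict.ext
        rw [PySem.Dict.items_insert_of_not_contains _ _
          (by rw [PySem.Dict.contains_eq_decide_mem_keys, pvMkD_keys]; simpa using hb)]
        show (ded.map pvPair) ++ [(pvBKey task, task)] = ded'.map pvPair
        simp [hd'def, pvPair]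
      rw [List.foldl_cons, List.foldl_cons, hstepA, hstepB]
      refine ih ded' ?_
      simp only [hd'def, List.map_append, List.map_cons, List.map_nil]
      rw [List.nodup_append]
      refine ⟨hnd, List.nodup_singleton _, ?_⟩
      intro x hx y hy
      rcases List.mem_singleton.1 hy with rfl
      exact fun he => hb (he ▸ hx)

-- ---- step 2: the merged-dict fold tracks B's groups fold entrywise through pvFm ----

lemma pv_mergeA_append (ts : List (List (String × String))) (t : List (String × String))
    (h : ts ≠ []) : pvMergeA (ts ++ [t]) = pvUpd (pvMergeA ts) ("，" ++ pvQVal t) := by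
  cases ts with
  | nil => exact absurd rfl h
  | cons a l => simp [pvMergeA]

lemma pv_get_map (l : List (String × List (List (String × String)))) (b : String) :
    (PySem.Dict.mk (l.map pvFm)).get? b = ((PySem.Dict.mk l).get? b).map pvMergeA := by
  induction l with
  | nil => rfl
  | cons p l ih =>
    obtain ⟨k, ts⟩ := p
    simp only [List.map_cons, pvFm, PySem.Dict.get?_mk_cons]
    by_cases h : (k == b) = true
    · simp [h]
    · simp [h, ih]

lemma pv_fold2 (tasks done : List (List (String × String)))
    (grp : List (String × List (List (String × String))))
    (hg : ∀ p ∈ grp, p.2 ≠ [] ∧ p.2.Sublist done ∧ ∀ t ∈ p.2, pvBKey t = p.1) :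
    (tasks.foldl pvMStep (PySem.Dict.mk (grp.map pvFm))).items
      = ((tasks.foldl pvGStep (PySem.Dict.mk grp)).items).map pvFm
    ∧ ∀ p ∈ (tasks.foldl pvGStep (PySem.Dict.mk grp)).items,
        p.2 ≠ [] ∧ p.2.Sublist (done ++ tasks) ∧ ∀ t ∈ p.2, pvBKey t = p.1 := by
  induction tasks generalizing done grp with
  | nil =>
    refine ⟨rfl, ?_⟩
    intro p hp
    rcases hg p hp with ⟨h1, h2, h3⟩
    exact ⟨h1, by simpa using h2, h3⟩
  | cons task rest ih =>
    simp only [List.foldl_cons]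
    cases hts : (PySem.Dict.mk grp).get? (pvBKey task) with
    | some ts =>
      have hmem : (pvBKey task, ts) ∈ grp := PySem.Dict.mem_items_of_get?_eq_some _ hts
      have hcon : (PySem.Dict.mk grp).contains (pvBKey task) = true := by
        rw [PySem.Dict.contains_eq_decide_mem_keys]
        exact decide_eq_true (PySem.Dict.mem_keys_of_mem_items _ hmem)
      have hconM : (PySem.Dict.mk (grp.map pvFm)).contains (pvBKey task) = true := by
        rw [PySem.Dict.contains_eq_decide_mem_keys]
        refine decide_eq_true ?_
        have := PySem.Dict.mem_keys_of_mem_items (PySem.Dict.mk (grp.map pvFm))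
          (p := (pvBKey task, pvMergeA ts)) ?_
        · exact this
        · show (pvBKey task, pvMergeA ts) ∈ grp.map pvFm
          exact List.mem_map_of_mem hmem
      have htsne : ts ≠ [] := (hg _ hmem).1
      set grp' : List (String × List (List (String × String))) :=
        grp.map (fun p => if (p.1 == pvBKey task) = true then (pvBKey task, ts ++ [task]) else p)
        with hg'def
      have hGstep : pvGStep (PySem.Dict.mk grp) task = PySem.Dict.mk grp' := by
        apply PySem.Dict.ext
        rw [pvGStep, PySem.Dict.items_insert_of_contains _ _ hcon]
        have : (PySem.Dict.mk grp).getD (pvBKey task) [] = ts := by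
          rw [PySem.Dict.getD_eq_get?_getD, hts]; rfl
        rw [this]
      have hMstep : pvMStep (PySem.Dict.mk (grp.map pvFm)) task = PySem.Dict.mk (grp'.map pvFm) := by
        have hgm : (PySem.Dict.mk (grp.map pvFm)).get? (pvBKey task) = some (pvMergeA ts) := by
          rw [pv_get_map, hts]; rfl
        apply PySem.Dict.ext
        simp only [pvMStep, hgm]
        rw [PySem.Dict.items_insert_of_contains _ _ hconM]
        show (grp.map pvFm).map _ = grp'.map pvFm
        rw [hg'def, List.map_map, List.map_map]
        refine List.map_congr_left ?_
        intro p hp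
        by_cases h : (p.1 == pvBKey task) = true
        · simp only [Function.comp_def, pvFm, h, if_pos]
          rw [pv_mergeA_append ts task htsne]
        · have h' : ¬ p.1 = pvBKey task := by simpa using h
          simp [pvFm, h']
      rw [hGstep, hMstep]
      have hg' : ∀ p ∈ grp', p.2 ≠ [] ∧ p.2.Sublist (done ++ [task]) ∧ ∀ t ∈ p.2, pvBKey t = p.1 := by
        intro p hp
        rw [hg'def] at hp
        rcases List.mem_map.1 hp with ⟨q, hq, rfl⟩
        rcases hg q hq with ⟨h1, h2, h3⟩
        by_cases h : (q.1 == pvBKey task) = true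
        · simp only [h, if_pos]
          refine ⟨by simp [htsne], ?_, ?_⟩
          · have hts2 : ts.Sublist done := ((hg _ hmem).2).1
            exact List.Sublist.append hts2 (List.Sublist.refl [task])
          · intro t ht
            rcases List.mem_append.1 ht with ht | ht
            · exact ((hg _ hmem).2).2 t ht
            · rcases List.mem_singleton.1 ht with rfl; rfl
        · simp only [h, if_neg, Bool.not_eq_true]
          exact ⟨h1, h2.trans (List.sublist_append_left done [task]), h3⟩
      have hih := ih (done ++ [task]) grp' hg'
      simpa only [List.append_assoc, List.singleton_append] using hih
    | none =>
      have hnone : (PySem.Dict.mk grp).get? (pvBKey task) = none := hts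
      have hcon : (PySem.Dict.mk grp).contains (pvBKey task) = false := by
        rw [PySem.Dict.contains_eq_decide_mem_keys, decide_eq_false_iff_not]
        rw [PySem.Dict.get?_eq_none_iff_not_mem_keys] at hnone
        exact hnone
      have hconM : (PySem.Dict.mk (grp.map pvFm)).contains (pvBKey task) = false := by
        rw [PySem.Dict.contains_eq_decide_mem_keys, decide_eq_false_iff_not]
        rw [← PySem.Dict.get?_eq_none_iff_not_mem_keys, pv_get_map, hnone]
        rfl
      set grp' := grp ++ [(pvBKey task, [task])] with hg'def
      have hGstep : pvGStep (PySem.Dict.mk grp) task = PySem.Dict.mk grp' := by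
        apply PySem.Dict.ext
        rw [pvGStep, PySem.Dict.items_insert_of_not_contains _ _ hcon]
        have : (PySem.Dict.mk grp).getD (pvBKey task) [] = [] := by
          rw [PySem.Dict.getD_eq_get?_getD, hnone]; rfl
        rw [this]
        rfl
      have hMstep : pvMStep (PySem.Dict.mk (grp.map pvFm)) task = PySem.Dict.mk (grp'.map pvFm) := by
        have hgm : (PySem.Dict.mk (grp.map pvFm)).get? (pvBKey task) = none := by
          rw [pv_get_map, hnone]; rfl
        apply PySem.Dict.ext
        simp only [pvMStep, hgm]
        rw [PySem.Dict.items_insert_of_not_contains _ _ hconM]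
        show grp.map pvFm ++ [(pvBKey task, task)] = grp'.map pvFm
        rw [hg'def, List.map_append]
        rfl
      rw [hGstep, hMstep]
      have hg' : ∀ p ∈ grp', p.2 ≠ [] ∧ p.2.Sublist (done ++ [task]) ∧ ∀ t ∈ p.2, pvBKey t = p.1 := by
        intro p hp
        rw [hg'def] at hp
        rcases List.mem_append.1 hp with hp | hp
        · rcases hg p hp with ⟨h1, h2, h3⟩
          exact ⟨h1, h2.trans (List.sublist_append_left done [task]), h3⟩
        · rcases List.mem_singleton.1 hp with rfl
          refine ⟨by simp, ?_, ?_⟩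
          · simpa using (List.sublist_append_right done [task])
          · intro t ht; rcases List.mem_singleton.1 ht with rfl; rfl
      have hih := ih (done ++ [task]) grp' hg'
      simpa only [List.append_assoc, List.singleton_append] using hih

-- ---- step 3: on a query-complete group, the += fold equals the one-shot join assignment ----

-- head with query set to v (assignment into an existing dict keeps the key's position)
def pvQSet (t : List (String × String)) (v : String) : List (String × String) :=
  ((PySem.Dict.mk t).insert "query" v).items

lemma pv_upd_eq_qset (t : List (String × String)) (hq : "query" ∈ t.map Prod.fst) (s : String) :
    pvUpd t s = pvQSet t (pvQVal t ++ s) := by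
  rw [pvUpd, PySem.Dict.modify, pvQSet]
  have : (PySem.Dict.mk t).getD "query" "" = pvQVal t := by
    rw [PySem.Dict.getD_eq_get?_getD, pvQVal]
  rw [this]

lemma pv_qset_qset (t : List (String × String)) (v w : String) :
    pvQSet (pvQSet t v) w = pvQSet t w := by
  rw [pvQSet, pvQSet, pvQSet,
    show PySem.Dict.mk ((PySem.Dict.mk t).insert "query" v).items
        = (PySem.Dict.mk t).insert "query" v from rfl,
    PySem.Dict.insert_insert_self]

lemma pv_qval_qset (t : List (String × String)) (v : String) : pvQVal (pvQSet t v) = v := by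
  rw [pvQVal, pvQSet,
    show PySem.Dict.mk ((PySem.Dict.mk t).insert "query" v).items
        = (PySem.Dict.mk t).insert "query" v from rfl,
    PySem.Dict.get?_insert_self]
  rfl

lemma pv_mem_keys_qset (t : List (String × String)) (v : String) :
    "query" ∈ (pvQSet t v).map Prod.fst := by
  have : "query" ∈ ((PySem.Dict.mk t).insert "query" v).keys :=
    (PySem.Dict.mem_keys_insert _ _ _ _).2 (Or.inl rfl)
  simpa [PySem.Dict.keys] using this

lemma pv_fold_qset (rs : List (List (String × String))) (h : List (String × String)) (q : String) :
    rs.foldl (fun acc t => pvUpd acc ("，" ++ pvQVal t)) (pvQSet h q)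
      = pvQSet h (rs.foldl (fun s t => s ++ ("，" ++ pvQVal t)) q) := by
  induction rs generalizing q with
  | nil => rfl
  | cons r rs' ih =>
    simp only [List.foldl_cons]
    rw [pv_upd_eq_qset (pvQSet h q) (pv_mem_keys_qset h q), pv_qval_qset, pv_qset_qset]
    exact ih (q ++ ("，" ++ pvQVal r))

lemma pv_join_absorb (sep a b : List Char) (l : List (List Char)) :
    PySem.Chars.join sep ((a ++ b) :: l) = a ++ PySem.Chars.join sep (b :: l) := by
  cases l with
  | nil => simp [PySem.Chars.join_singleton]
  | cons x xs => rw [PySem.Chars.join_cons_cons, PySem.Chars.join_cons_cons]; simp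

lemma pv_join_foldl (sep : List Char) (l : List (List Char)) (a : List Char) :
    PySem.Chars.join sep (a :: l) = l.foldl (fun s x => s ++ (sep ++ x)) a := by
  induction l generalizing a with
  | nil => simp [PySem.Chars.join_singleton]
  | cons x xs ih =>
    rw [List.foldl_cons, ← ih, PySem.Chars.join_cons_cons, ← pv_join_absorb]
    simp [List.append_assoc]

lemma pv_foldl_toList (sep : String) (l : List String) (a : String) :
    (l.foldl (fun s x => s ++ (sep ++ x)) a).toList
      = (l.map String.toList).foldl (fun s x => s ++ (sep.toList ++ x)) a.toList := by
  induction l generalizing a with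
  | nil => rfl
  | cons x xs ih =>
    simp only [List.foldl_cons, List.map_cons, ih, String.toList_append]

lemma pv_join_eq (sep : String) (a : String) (l : List String) :
    PySem.Str.join sep (a :: l) = l.foldl (fun s x => s ++ (sep ++ x)) a := by
  apply String.toList_inj.mp
  rw [PySem.Str.toList_join, List.map_cons, pv_join_foldl, pv_foldl_toList]

lemma pv_merge_eq (ts : List (List (String × String))) (hne : ts ≠ [])
    (hq : 1 < ts.length → ∀ t ∈ ts, "query" ∈ t.map Prod.fst) :
    pvMergeA ts = pvFinish ts := by
  match ts with
  | [h] => rfl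
  | h :: r :: rs =>
    have hlen : 1 < (h :: r :: rs).length := by simp
    have hqh : "query" ∈ h.map Prod.fst := hq hlen h (by simp)
    show (r :: rs).foldl (fun acc t => pvUpd acc ("，" ++ pvQVal t)) h = pvFinish (h :: r :: rs)
    rw [List.foldl_cons, pv_upd_eq_qset h hqh, pv_fold_qset]
    rw [pvFinish]
    simp only [hlen, if_pos, List.headD_cons]
    show pvQSet h _ = pvQSet h (PySem.Str.join "，" ((h :: r :: rs).map pvQVal))
    rw [List.map_cons, pv_join_eq, List.map_cons, List.foldl_cons, List.foldl_map]

-- ===== VERDICT (by name: the statement is the Claim_ definition above) =====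
theorem deduplicate_tasks_py_spec : Claim_equal_deduplicate_tasks_py := by
  intro tasks _ hpre
  show deduplicate_tasks_py tasks = deduplicate_tasks_py_alt tasks
  have h0 : (PySem.Dict.empty, ([] : List (List (String × String)))) = (pvMkIdx [], []) := rfl
  have hA : deduplicate_tasks_py tasks = (tasks.foldl pvMStep (PySem.Dict.mk [])).values := by
    rw [deduplicate_tasks_py, h0]
    exact pv_fold tasks [] (by simp)
  rcases pv_fold2 tasks [] [] (by simp) with ⟨heq, hinv⟩
  rw [hA]
  show (tasks.foldl pvMStep (PySem.Dict.mk ([].map pvFm))).items.map Prod.snd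
      = ((tasks.foldl pvGStep PySem.Dict.empty).items.map Prod.snd).map pvFinish
  rw [heq]
  show ((tasks.foldl pvGStep (PySem.Dict.mk [])).items.map pvFm).map Prod.snd
      = ((tasks.foldl pvGStep (PySem.Dict.mk [])).items.map Prod.snd).map pvFinish
  rw [List.map_map, List.map_map]
  refine List.map_congr_left ?_
  intro p hp
  rcases hinv p hp with ⟨h1, h2, h3⟩
  show pvMergeA p.2 = pvFinish p.2
  refine pv_merge_eq p.2 h1 ?_
  intro hlen t ht
  refine hpre.2 t (h2.subset ht) ?_
  have hcnt : p.2.countP (fun u => pvBKey u == pvBKey t) = p.2.length := by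
    rw [List.countP_eq_length]
    intro u hu
    rw [h3 u hu, h3 t ht]
    exact beq_self_eq_true _
  calc 1 < p.2.length := hlen
    _ = p.2.countP (fun u => pvBKey u == pvBKey t) := hcnt.symm
    _ ≤ tasks.countP (fun u => pvBKey u == pvBKey t) := by
        have h4 : p.2.countP (fun u => pvBKey u == pvBKey t)
            ≤ ([] ++ tasks).countP (fun u => pvBKey u == pvBKey t) := h2.countP_le
        simpa using h4
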